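-- pv_equiv track=rewrite | github.com/austencloud/tka-desktop | v2/src/application/services/component_layout_service.py | calculate_vertical_layout
-- ===== SOURCE A (Python) =====
-- from typing import Dict, Any, Tuple
--
-- def calculate_vertical_layout(
--     components: Dict[str, Any], container_size: Tuple[int, int]
-- ) -> Dict[str, Tuple[int, int]]:
--     """Calculate vertical layout for components."""
--     positions = {}
--     current_y = 10
--     container_width = container_size[0]
--
--     for name, config in components.items():
--         width = config.get("width", 100)
--         height = config.get("height", 100)
--
--         # Center horizontally
--         x = (container_width - width) // 2
--
--         positions[name] = (x, current_y)
--         current_y += height + 10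
--
--     return positions
-- ===== SOURCE B (Python) =====
-- def calculate_vertical_layout(components, container_size):
--     """Calculate vertical layout: prefix-sum the y offsets first, then assemble."""
--     container_width = container_size[0]
--     heights = [cfg.get("height", 100) for cfg in components.values()]
--     ys = [10]
--     for h in heights[:-1]:
--         ys.append(ys[-1] + h + 10)
--     return {
--         name: ((container_width - cfg.get("width", 100)) // 2, y)
--         for (name, cfg), y in zip(components.items(), ys)
--     }
-- ===== Notes on version B (the rewrite author's own statement) =====
-- stated objective: alternative
-- what changed: Instead of threading current_y through one loop that builds the dict, B first computes the list of cumulative y offsets (a prefix sum over heights seeded at 10) and then assembles the positions by zipping components with that list.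
import Mathlib
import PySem

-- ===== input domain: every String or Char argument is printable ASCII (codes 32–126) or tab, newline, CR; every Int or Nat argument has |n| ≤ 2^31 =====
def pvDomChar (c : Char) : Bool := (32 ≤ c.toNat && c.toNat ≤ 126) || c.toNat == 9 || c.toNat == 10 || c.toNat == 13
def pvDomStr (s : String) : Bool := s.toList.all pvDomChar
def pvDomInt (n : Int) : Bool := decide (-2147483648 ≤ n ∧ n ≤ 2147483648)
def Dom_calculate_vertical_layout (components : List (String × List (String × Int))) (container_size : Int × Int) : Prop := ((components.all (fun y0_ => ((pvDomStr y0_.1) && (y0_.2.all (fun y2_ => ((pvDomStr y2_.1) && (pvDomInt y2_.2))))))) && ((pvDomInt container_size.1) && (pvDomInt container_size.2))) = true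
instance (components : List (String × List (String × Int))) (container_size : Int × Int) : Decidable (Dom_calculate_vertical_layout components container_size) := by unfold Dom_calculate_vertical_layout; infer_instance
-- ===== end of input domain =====

-- ===== PORT A =====
-- B differs from A only in decomposition: A threads current_y through one loop; B precomputes the
-- prefix-sum list of y offsets and then zips.  (Objective: alternative decomposition, not speed.)
def calculate_vertical_layout (components : List (String × List (String × Int))) (container_size : Int × Int) : List (String × Int × Int) :=
  (components.foldl
    (fun (st : List (String × Int × Int) × Int) nc =>
      let width := (nc.2.lookup "width").getD 100
      let height := (nc.2.lookup "height").getD 100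
      let x := PySem.Int.floordiv (container_size.1 - width) 2
      (st.1 ++ [(nc.1, x, st.2)], st.2 + height + 10))
    ([], 10)).1

-- ===== PORT B =====
def calculate_vertical_layout_alt (components : List (String × List (String × Int))) (container_size : Int × Int) : List (String × Int × Int) :=
  let container_width := container_size.1
  let heights := components.map (fun nc => (nc.2.lookup "height").getD 100)
  -- heights[:-1] is heights.dropLast; ys[-1] is PySem.List.pyGetD acc (-1) _ (acc is never empty)
  let ys := heights.dropLast.foldl (fun acc h => acc ++ [PySem.List.pyGetD acc (-1) 0 + h + 10]) [10]
  (components.zip ys).map (fun py =>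
    (py.1.1, PySem.Int.floordiv (container_width - (py.1.2.lookup "width").getD 100) 2, py.2))

-- ===== PRECONDITION & SPEC =====
-- Pre_ excludes association lists with a duplicated component name or a duplicated key inside a
-- config: such lists denote no Python dict input (dict construction collapses duplicates), so A's
-- behaviour on them is not defined by the source.
def Pre_calculate_vertical_layout (components : List (String × List (String × Int))) (container_size : Int × Int) : Prop :=
  (components.map Prod.fst).Nodup ∧ ∀ nc ∈ components, (nc.2.map Prod.fst).Nodup

instance (components : List (String × List (String × Int))) (container_size : Int × Int) : Decidable (Pre_calculate_vertical_layout components container_size) := by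
  unfold Pre_calculate_vertical_layout; infer_instance

def pvWitness_calculate_vertical_layout : (List (String × List (String × Int))) × (Int × Int) :=
  ([("header", [("width", 50), ("height", 20)]), ("body", [])], (100, 200))

def Spec_calculate_vertical_layout (components : List (String × List (String × Int))) (container_size : Int × Int) (out : List (String × Int × Int)) : Prop := out = calculate_vertical_layout_alt components container_size
instance (components : List (String × List (String × Int))) (container_size : Int × Int) (out : List (String × Int × Int)) : Decidable (Spec_calculate_vertical_layout components container_size out) := by unfold Spec_calculate_vertical_layout; infer_instance

-- ===== CLAIM (what is proved, stated in full; the proofs are below) =====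
def Claim_equal_calculate_vertical_layout : Prop := ∀ (components : List (String × List (String × Int))) (container_size : Int × Int), Dom_calculate_vertical_layout components container_size → Pre_calculate_vertical_layout components container_size → Spec_calculate_vertical_layout components container_size (calculate_vertical_layout components container_size)

-- ===== LEMMAS AND PROOFS =====

-- Common specification: the row produced for one component at a given y, and the whole layout.
def goVL (cw : Int) : List (String × List (String × Int)) → Int → List (String × Int × Int)
  | [], _ => []
  | nc :: rest, y =>
      (nc.1, PySem.Int.floordiv (cw - (nc.2.lookup "width").getD 100) 2, y) ::
        goVL cw rest (y + (nc.2.lookup "height").getD 100 + 10)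

-- A's fold equals the spec.
theorem foldA_eq_goVL (cw : Int) (comps : List (String × List (String × Int)))
    (acc : List (String × Int × Int)) (y : Int) :
    (comps.foldl
      (fun (st : List (String × Int × Int) × Int) nc =>
        let width := (nc.2.lookup "width").getD 100
        let height := (nc.2.lookup "height").getD 100
        let x := PySem.Int.floordiv (cw - width) 2
        (st.1 ++ [(nc.1, x, st.2)], st.2 + height + 10))
      (acc, y)).1 = acc ++ goVL cw comps y := by
  induction comps generalizing acc y with
  | nil => simp [goVL]
  | cons nc rest ih =>
      rw [List.foldl_cons]
      exact (ih _ _).trans (by simp [goVL])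

-- The prefix-sum list of y offsets, recursively.
def ysRec (y : Int) : List Int → List Int
  | [] => [y]
  | h :: hs => y :: ysRec (y + h + 10) hs

theorem foldYs_eq_ysRec (hs : List Int) (acc : List Int) (y : Int) :
    hs.foldl (fun a h => a ++ [PySem.List.pyGetD a (-1) 0 + h + 10]) (acc ++ [y])
      = acc ++ ysRec y hs := by
  induction hs generalizing acc y with
  | nil => simp [ysRec]
  | cons h hs ih =>
      simp only [List.foldl_cons, PySem.List.pyGetD_neg_one_append_singleton]
      rw [ih (acc ++ [y]) (y + h + 10)]
      simp [ysRec]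

-- B's zip-map over the prefix sums equals the spec.
theorem zip_ysRec_eq_goVL (cw : Int) (comps : List (String × List (String × Int))) (y : Int) :
    (comps.zip (ysRec y ((comps.map (fun nc => (nc.2.lookup "height").getD 100)).dropLast))).map
        (fun py => (py.1.1, PySem.Int.floordiv (cw - (py.1.2.lookup "width").getD 100) 2, py.2))
      = goVL cw comps y := by
  induction comps generalizing y with
  | nil => simp [goVL]
  | cons nc rest ih =>
      cases rest with
      | nil => simp [goVL, ysRec]
      | cons d rs =>
          simp only [List.map_cons, goVL]
          exact congrArg _ (ih _)

-- ===== VERDICT (by name: the statement is the Claim_ definition above) =====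
theorem calculate_vertical_layout_spec : Claim_equal_calculate_vertical_layout := by
  intro components container_size _ _
  unfold Spec_calculate_vertical_layout
  rw [show calculate_vertical_layout components container_size
        = goVL container_size.1 components 10 by
      unfold calculate_vertical_layout
      simpa using foldA_eq_goVL container_size.1 components [] 10]
  simp only [calculate_vertical_layout_alt]
  rw [show ([10] : List Int) = [] ++ [10] from rfl, foldYs_eq_ysRec]
  simpa using (zip_ysRec_eq_goVL container_size.1 components 10).symm
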